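-- pv_equiv track=rewrite | github.com/SFin94/molLego | molLego/parsers/parse_gaussian.py | _job_from_input
-- ===== SOURCE A (Python) =====
-- def _job_from_input(job_input):
--     """
--     Set job type from job input.
--
--     Parameters
--     ----------
--     job_input : `str`
--         Job input line for calculation.
--
--     Returns
--     -------
--     :class:`str`
--         The calculation type (opt, fopt, freq, sp, scan).
--
--     """
--     # Use flags to try to deduce the job type.
--     calculation_flags = {
--         'opt': False,
--         'freq': False,
--         'scan': False,
--         }
--     job_calculation_types = {
--         'opt': [True, False, False],
--         'fopt': [True, True, False],
--         'freq': [False, True, False],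
--         'scan_rigid': [False, False, True],
--         'sp': [False, False, False]
--         }
--
--     # Set calculation flag to True if present in job input.
--     for flag in calculation_flags.keys():
--         if flag in job_input.lower():
--             calculation_flags[flag] = True
--
--     # Set job type based on calculation bool results.
--     for job, calc_type in job_calculation_types.items():
--         if calc_type == list(calculation_flags.values()):
--             return job
-- ===== SOURCE B (Python) =====
-- def _job_from_input(job_input):
--     s = job_input.lower()
--     opt, freq, scan = 'opt' in s, 'freq' in s, 'scan' in s
--     if scan:
--         return 'scan_rigid' if not opt and not freq else None
--     if opt:
--         return 'fopt' if freq else 'opt'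
--     return 'freq' if freq else 'sp'
-- ===== Notes on version B (the rewrite author's own statement) =====
-- stated objective: simpler
-- what changed: Replaces the two dicts (flag dict mutated in a loop, then a scan over a job->pattern table comparing boolean lists) with three local booleans and a direct conditional ladder, preserving None for flag combinations the table does not list.
import Mathlib
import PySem

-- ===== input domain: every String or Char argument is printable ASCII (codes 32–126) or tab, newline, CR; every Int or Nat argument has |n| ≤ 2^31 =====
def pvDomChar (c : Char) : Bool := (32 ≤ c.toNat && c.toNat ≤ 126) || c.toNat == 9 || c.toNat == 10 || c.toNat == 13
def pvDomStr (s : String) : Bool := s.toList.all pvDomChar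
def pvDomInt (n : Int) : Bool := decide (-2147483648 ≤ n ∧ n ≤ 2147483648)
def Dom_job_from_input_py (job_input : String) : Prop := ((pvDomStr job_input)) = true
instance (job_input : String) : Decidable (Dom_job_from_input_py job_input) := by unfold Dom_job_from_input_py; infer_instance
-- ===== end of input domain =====

-- B replaces A's mutated flag dict and job->pattern table scan by three booleans and a
-- direct conditional ladder (objective: simpler).

-- ===== PORT A =====
def job_from_input_py (job_input : String) : Option String :=
  let calculation_flags : PySem.Dict String Bool :=
    (((PySem.Dict.empty).insert "opt" false).insert "freq" false).insert "scan" false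
  let job_calculation_types : PySem.Dict String (List Bool) :=
    (((((PySem.Dict.empty).insert "opt" [true, false, false]).insert
        "fopt" [true, true, false]).insert
        "freq" [false, true, false]).insert
        "scan_rigid" [false, false, true]).insert
        "sp" [false, false, false]
  let calculation_flags :=
    calculation_flags.keys.foldl
      (fun d flag =>
        if PySem.Str.isIn flag (PySem.Str.lower job_input) then d.insert flag true else d)
      calculation_flags
  job_calculation_types.items.foldl
    (fun acc jc =>
      match acc with
      | some _ => acc
      | none => if jc.2 == calculation_flags.values then some jc.1 else none)
    none

-- ===== PORT B =====
def job_from_input_py_alt (job_input : String) : Option String :=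
  let s := PySem.Str.lower job_input
  let opt := PySem.Str.isIn "opt" s
  let freq := PySem.Str.isIn "freq" s
  let scan := PySem.Str.isIn "scan" s
  if scan then (if !opt && !freq then some "scan_rigid" else none)
  else if opt then (if freq then some "fopt" else some "opt")
  else if freq then some "freq" else some "sp"

-- ===== PRECONDITION & SPEC =====
def Spec_job_from_input_py (job_input : String) (out : Option String) : Prop := out = job_from_input_py_alt job_input
instance (job_input : String) (out : Option String) : Decidable (Spec_job_from_input_py job_input out) := by unfold Spec_job_from_input_py; infer_instance

-- ===== CLAIM (what is proved, stated in full; the proofs are below) =====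
def Claim_equal_job_from_input_py : Prop := ∀ (job_input : String), Dom_job_from_input_py job_input → Spec_job_from_input_py job_input (job_from_input_py job_input)

-- ===== LEMMAS AND PROOFS =====

-- ===== VERDICT (by name: the statement is the Claim_ definition above) =====
theorem job_from_input_py_spec : Claim_equal_job_from_input_py := by
  intro job_input _
  unfold Spec_job_from_input_py job_from_input_py job_from_input_py_alt
  cases h1 : PySem.Chars.isIn ['o','p','t'] (PySem.Chars.lower job_input.toList) <;>
  cases h2 : PySem.Chars.isIn ['f','r','e','q'] (PySem.Chars.lower job_input.toList) <;>
  cases h3 : PySem.Chars.isIn ['s','c','a','n'] (PySem.Chars.lower job_input.toList) <;>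
    simp [PySem.Dict.insert, PySem.Dict.contains, PySem.Dict.empty, PySem.Dict.keys,
      PySem.Dict.values, h1, h2, h3]
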